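-- pv_equiv track=rewrite | github.com/PaulSeipl/AdventOfCode | SaulPeipl/2021/day3/code.py | calculateOxygenRating
-- ===== SOURCE A (Python) =====
-- def calculateOxygenRating(input):
--     copyInput = input.copy()
--     for index in range(len(copyInput[0])):
--         commonBit = getCommonBit(getListOfIndex(copyInput, index))
--         copyInput = equalIndexBitList(copyInput, index, commonBit)
--         if len(copyInput) == 1:
--             break
--
--     return int(copyInput[0], 2)
--
-- def equalIndexBitList(input, index, bit):
--     return [bits for bits in input if bits[index] == bit]
--
-- def getCommonBit(indexList):
--     return toIntToString(indexList.count("1") >= indexList.count("0"))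
--
-- def toIntToString(string):
--     return str(int(string))
--
-- def getListOfIndex(input, index):
--     return list(map(lambda string: string[index], input))
-- ===== SOURCE B (Python) =====
-- def calculateOxygenRating(input):
--     def select(cands, index, width):
--         ones = []
--         zeros = []
--         for s in cands:
--             c = s[index]
--             if c == "1":
--                 ones.append(s)
--             elif c == "0":
--                 zeros.append(s)
--         chosen = ones if len(ones) >= len(zeros) else zeros
--         if len(chosen) == 1 or index + 1 >= width:
--             return chosen
--         return select(chosen, index + 1, width)
--
--     survivors = select(list(input), 0, len(input[0]))
--     return int(survivors[0], 2)
-- ===== Notes on version B (the rewrite author's own statement) =====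
-- stated objective: alternative
-- what changed: Replaced the per-index count-then-filter pipeline (build the column, count '1'/'0', then refilter the whole list, via four helper functions and a flat index loop) by a recursive descent over the bit index that splits the candidates into a ones-list and a zeros-list in a single pass and recurses on the majority side.
-- outside the precondition, e.g. on calculateOxygenRating(['110', 'bcccb0']): A returns 6, B returns 6; on calculateOxygenRating(['00100101', '9', '11011001']): A returns 217, B returns 217
import Mathlib
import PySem

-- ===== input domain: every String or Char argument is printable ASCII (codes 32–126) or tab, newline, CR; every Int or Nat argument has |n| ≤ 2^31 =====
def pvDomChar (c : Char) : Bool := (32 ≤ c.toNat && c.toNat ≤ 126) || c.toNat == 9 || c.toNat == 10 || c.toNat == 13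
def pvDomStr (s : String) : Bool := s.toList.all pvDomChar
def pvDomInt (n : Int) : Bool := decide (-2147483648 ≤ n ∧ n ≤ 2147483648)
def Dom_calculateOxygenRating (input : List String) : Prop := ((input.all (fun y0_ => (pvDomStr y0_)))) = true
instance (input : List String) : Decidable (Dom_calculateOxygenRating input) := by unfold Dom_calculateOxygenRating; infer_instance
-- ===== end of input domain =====

-- B replaces A's count-then-filter loop by a recursive one-pass ones/zeros partition descent
-- on the bit index (objective: alternative decomposition, same asymptotic cost).

-- shared primitives: s[i] for a Nat index that Pre_ keeps in range, and int(s, 2)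
-- (pvIntBase2 is exact for the strings Python's int(s, 2) accepts over the Dom alphabet)
def pvCharAt (s : String) (i : Nat) : Char := (PySem.Str.pyGet? s (i : Int)).getD ' '
def pvIsWS (c : Char) : Bool := c == ' ' || c == '\t' || c == '\n' || c == '\r'
def pvIntBase2 (s : String) : Int :=
  let l := (s.toList.dropWhile pvIsWS).reverse.dropWhile pvIsWS |>.reverse
  let p : Int × List Char :=
    match l with
    | '+' :: r => (1, r)
    | '-' :: r => (-1, r)
    | _ => (1, l)
  let d : List Char :=
    match p.2 with
    | '0' :: 'b' :: r => r
    | '0' :: 'B' :: r => r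
    | _ => p.2
  p.1 * ((d.filter (fun c => !(c == '_'))).foldl
          (fun acc c => 2 * acc + (if c = '1' then 1 else 0)) 0)

-- ===== PORT A =====
def getListOfIndex (input : List String) (index : Nat) : List Char :=
  input.map (fun s => pvCharAt s index)

def toIntToString (b : Bool) : Char := if b then '1' else '0'   -- str(int(b))

def getCommonBit (indexList : List Char) : Char :=
  toIntToString (decide (indexList.count '0' ≤ indexList.count '1'))

def equalIndexBitList (input : List String) (index : Nat) (bit : Char) : List String :=
  input.filter (fun s => pvCharAt s index == bit)

def pvALoop : List Nat → List String → List String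
  | [], cur => cur
  | index :: rest, cur =>
      let commonBit := getCommonBit (getListOfIndex cur index)
      let cur' := equalIndexBitList cur index commonBit
      if cur'.length = 1 then cur' else pvALoop rest cur'

def calculateOxygenRating (input : List String) : Int :=
  let copyInput := input
  pvIntBase2 ((pvALoop (List.range (copyInput.headD "").toList.length) copyInput).headD "")

-- ===== PORT B =====
-- one pass over the candidates: ones-list and zeros-list (non-binary characters dropped)
def pvPartition01 (cands : List String) (index : Nat) : List String × List String :=
  cands.foldr
    (fun s acc =>
      let c := pvCharAt s index
      if c = '1' then (s :: acc.1, acc.2)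
      else if c = '0' then (acc.1, s :: acc.2)
      else acc)
    ([], [])

def pvSelect (cands : List String) (index width : Nat) : List String :=
  let p := pvPartition01 cands index
  let chosen := if p.2.length ≤ p.1.length then p.1 else p.2
  if chosen.length = 1 ∨ width ≤ index + 1 then chosen
  else pvSelect chosen (index + 1) width
  termination_by width - index
  decreasing_by simp_all; omega

def calculateOxygenRating_alt (input : List String) : Int :=
  pvIntBase2 ((pvSelect input 0 (input.headD "").toList.length).headD "")

-- ===== PRECONDITION & SPEC =====
-- helpers for Pre_'s single-bit branch (closed form: counts of head characters, first match)
def pvIsBit (c : Char) : Bool := c == '0' || c == '1'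
def pvBinDigits : List Char → Bool
  | [] => false
  | [c] => pvIsBit c
  | c :: '_' :: cs => pvIsBit c && pvBinDigits cs
  | c :: cs => pvIsBit c && pvBinDigits cs
-- the strings Python's int(s, 2) accepts (whitespace, sign, 0b/0B prefix, '_' between digits;
-- exact on the Dom alphabet, whose only whitespace characters are space/tab/newline/CR)
def pvBinLiteral (s : String) : Bool :=
  let l := (s.toList.dropWhile pvIsWS).reverse.dropWhile pvIsWS |>.reverse
  let l1 := match l with
    | '+' :: r => r
    | '-' :: r => r
    | _ => l
  match l1 with
  | '0' :: 'b' :: r | '0' :: 'B' :: r =>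
      (match r with | '_' :: r' => pvBinDigits r' | _ => pvBinDigits r)
  | _ => pvBinDigits l1
def pvHeadSurvivor (input : List String) : String :=
  let c1 := input.countP (fun s => s.toList.headD ' ' == '1')
  let c0 := input.countP (fun s => s.toList.headD ' ' == '0')
  let bit : Char := if c0 ≤ c1 then '1' else '0'
  (input.find? (fun s => s.toList.headD ' ' == bit)).getD ""

-- Pre_ covers two closed-form families on which A provably returns: (a) nonempty lists of
-- binary '0'/'1' strings at least as long as the first, and (b) lists whose first string has
-- length 1, all strings nonempty, where the head-majority-bit's first match parses under
-- int(s, 2).  Outside Pre_ A raises (IndexError/ValueError) on almost all inputs; the excluded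
-- inputs on which A still returns (non-binary characters that the filtering happens to discard
-- before they are indexed or parsed) are not a closed-form family, and B returns A's exact
-- value on every one of them (see the cited examples).
def Pre_calculateOxygenRating (input : List String) : Prop :=
  input ≠ [] ∧ 1 ≤ (input.headD "").toList.length ∧
    (input.all (fun s => decide ((input.headD "").toList.length ≤ s.toList.length) &&
        s.toList.all pvIsBit) = true
     ∨ ((input.headD "").toList.length = 1 ∧
        input.all (fun s => decide (1 ≤ s.toList.length)) = true ∧
        pvBinLiteral (pvHeadSurvivor input) = true))
instance (input : List String) : Decidable (Pre_calculateOxygenRating input) := by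
  unfold Pre_calculateOxygenRating; infer_instance

def pvWitness_calculateOxygenRating : List String := ["10", "01", "11"]

def Spec_calculateOxygenRating (input : List String) (out : Int) : Prop := out = calculateOxygenRating_alt input
instance (input : List String) (out : Int) : Decidable (Spec_calculateOxygenRating input out) := by unfold Spec_calculateOxygenRating; infer_instance

-- ===== CLAIM (what is proved, stated in full; the proofs are below) =====
def Claim_equal_calculateOxygenRating : Prop := ∀ (input : List String), Dom_calculateOxygenRating input → Pre_calculateOxygenRating input → Spec_calculateOxygenRating input (calculateOxygenRating input)

-- ===== LEMMAS AND PROOFS =====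

lemma pvPartition01_eq (cands : List String) (i : Nat) :
    pvPartition01 cands i =
      (cands.filter (fun s => pvCharAt s i == '1'),
       cands.filter (fun s => pvCharAt s i == '0')) := by
  induction cands with
  | nil => rfl
  | cons s cs ih =>
    simp only [pvPartition01, List.foldr_cons] at *
    rw [ih]
    by_cases h1 : pvCharAt s i = '1'
    · simp [h1]
    · by_cases h0 : pvCharAt s i = '0'
      · simp [h0]
      · simp [h0, h1]

lemma pvCount_col (cands : List String) (i : Nat) (b : Char) :
    (getListOfIndex cands i).count b
      = (cands.filter (fun s => pvCharAt s i == b)).length := by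
  simp only [getListOfIndex, List.count, List.countP_map, ← List.countP_eq_length_filter]
  rfl

-- one step of A equals one step of B: the filtered list is the chosen partition side
lemma pvStep (cands : List String) (i : Nat) :
    equalIndexBitList cands i (getCommonBit (getListOfIndex cands i)) =
      (if (pvPartition01 cands i).2.length ≤ (pvPartition01 cands i).1.length
       then (pvPartition01 cands i).1
       else (pvPartition01 cands i).2) := by
  rw [pvPartition01_eq]
  by_cases hc : (getListOfIndex cands i).count '0' ≤ (getListOfIndex cands i).count '1'
  · have hbit : getCommonBit (getListOfIndex cands i) = '1' := by
      simp [getCommonBit, toIntToString, hc]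
    rw [hbit, if_pos (by rw [← pvCount_col, ← pvCount_col]; exact hc)]
    rfl
  · have hbit : getCommonBit (getListOfIndex cands i) = '0' := by
      simp [getCommonBit, toIntToString, hc]
    rw [hbit, if_neg (by rw [← pvCount_col, ← pvCount_col]; omega)]
    rfl

lemma pvMain (W : Nat) : ∀ n i cur, i + n = W → 1 ≤ n →
    pvALoop (List.range' i n) cur = pvSelect cur i W := by
  intro n
  induction n with
  | zero => intro i cur _ h1; omega
  | succ n ih =>
    intro i cur hW _
    rw [List.range'_succ]
    rw [pvSelect]
    rw [← pvStep]
    show (if (equalIndexBitList cur i (getCommonBit (getListOfIndex cur i))).length = 1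
          then equalIndexBitList cur i (getCommonBit (getListOfIndex cur i))
          else pvALoop (List.range' (i + 1) n) (equalIndexBitList cur i (getCommonBit (getListOfIndex cur i)))) = _
    by_cases h1 : (equalIndexBitList cur i (getCommonBit (getListOfIndex cur i))).length = 1
    · simp [h1]
    · by_cases h2 : W ≤ i + 1
      · have hn : n = 0 := by omega
        subst hn
        simp [pvALoop, h1, h2]
      · rw [if_neg h1, if_neg (by push Not; exact ⟨fun h => absurd h h1, by omega⟩)]
        exact ih (i + 1) (equalIndexBitList cur i (getCommonBit (getListOfIndex cur i)))
          (by omega) (by omega)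

-- ===== VERDICT (by name: the statement is the Claim_ definition above) =====
theorem calculateOxygenRating_spec : Claim_equal_calculateOxygenRating := by
  intro input _ hpre
  unfold Spec_calculateOxygenRating
  obtain ⟨-, hL, -⟩ := hpre
  simp only [calculateOxygenRating, calculateOxygenRating_alt]
  rw [List.range_eq_range',
    pvMain ((input.headD "").toList.length) ((input.headD "").toList.length) 0 input (by omega) hL]
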